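-- pv_equiv track=rewrite | github.com/KostadinHamanov/HackBG-Programming101-3 | week01/2-The-Real-Deal/TheRealDeal.py | is_number_balanced
-- ===== SOURCE A (Python) =====
-- def is_number_balanced(n):
--     if n < 10:
--         return True
--
--     digits = list(str(n))
--     length = len(str(n))
--     sumLeft = sumRight = 0
--
--     for i in range(0, length // 2):
--         sumLeft += int(digits[i])
--         sumRight += int(digits[length - i - 1])
--
--     if sumLeft == sumRight:
--         return True
--     else:
--         return False
-- ===== SOURCE B (Python) =====
-- def digit_sum(m):
--     s = 0
--     while m:
--         s += m % 10
--         m //= 10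
--     return s
--
--
-- def is_number_balanced(n):
--     if n < 10:
--         return True
--
--     # count the digits of n with a power-of-ten probe
--     p, d = 1, 0
--     while p <= n:
--         p *= 10
--         d += 1
--
--     half = d // 2
--     low = n % 10 ** half            # the low half of the number
--     high = n // 10 ** (d - half)    # the high half of the number
--     return digit_sum(high) == digit_sum(low)
-- ===== Notes on version B (the rewrite author's own statement) =====
-- stated objective: alternative
-- what changed: B never materialises a digit list or string: it counts digits with a power-of-ten probe, splits the number arithmetically into its low half (n % 10**half) and high half (n // 10**(d-half)), and compares their recursive digit sums, replacing A's string conversion and two-ended indexed loop over characters.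
import Mathlib
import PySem

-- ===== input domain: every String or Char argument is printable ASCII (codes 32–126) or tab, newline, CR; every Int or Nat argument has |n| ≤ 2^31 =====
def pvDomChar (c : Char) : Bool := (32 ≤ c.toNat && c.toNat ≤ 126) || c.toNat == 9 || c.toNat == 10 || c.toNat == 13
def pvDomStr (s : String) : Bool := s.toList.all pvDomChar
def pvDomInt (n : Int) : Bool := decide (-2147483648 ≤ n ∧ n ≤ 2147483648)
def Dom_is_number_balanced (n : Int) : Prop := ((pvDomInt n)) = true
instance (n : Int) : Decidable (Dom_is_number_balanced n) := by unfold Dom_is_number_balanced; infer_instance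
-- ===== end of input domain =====

-- B never builds a digit list or string: it splits the number itself into its low and
-- high halves with powers of ten and compares their recursive digit sums (objective:
-- alternative algorithm, purely arithmetic).

-- ===== PORT A =====
-- int(digits[i]) on a one-character digit string; the `.getD 0` only totalises the
-- Option (inside the guarded branch the index is always in range and the char a digit).
def pvCharVal (digits : List Char) (i : Int) : Int :=
  ((PySem.List.pyGet? digits i).bind (fun c => PySem.Int.ofChars? [c])).getD 0

def is_number_balanced (n : Int) : Bool :=
  if n < 10 then true
  else
    let digits := PySem.Int.toChars n                    -- digits = list(str(n))
    let length := PySem.Str.len (PySem.Int.toStr n)      -- length = len(str(n))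
    let s := (PySem.List.pyRange 0 (PySem.Int.floordiv length 2) 1).foldl
      (fun (st : Int × Int) (i : Int) =>
        (st.1 + pvCharVal digits i,                      -- sumLeft  += int(digits[i])
         st.2 + pvCharVal digits (length - i - 1)))      -- sumRight += int(digits[length-i-1])
      (0, 0)
    if s.1 == s.2 then true else false

-- ===== PORT B =====
-- `p, d = 1, 0; while p <= n: p *= 10; d += 1` of Source B; reached only with n ≥ 10,
-- where Python's ints are nonnegative here, so Nat arithmetic is exact.  The `0 < p`
-- conjunct only totalises the recursion (p starts at 1 and only grows).
def pvCountDigits (n p d : Nat) : Nat :=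
  if h : 0 < p ∧ p ≤ n then pvCountDigits n (10 * p) (d + 1) else d
termination_by n + 1 - p
decreasing_by omega

-- the  s = 0; while m: s += m % 10; m //= 10  loop of Source B's digit_sum (m ≥ 0 here,
-- so Python's % and // coincide with Nat.mod / Nat.div)
def pyDigitSum (s m : Nat) : Nat :=
  if h : m = 0 then s else pyDigitSum (s + m % 10) (m / 10)
decreasing_by exact Nat.div_lt_self (Nat.pos_of_ne_zero h) (by norm_num)

def is_number_balanced_alt (n : Int) : Bool :=
  if n < 10 then true
  else
    let d := pvCountDigits n.toNat 1 0        -- the power-of-ten counting loop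
    let half := d / 2                         -- half = d // 2 (nonnegative: Nat div)
    let low := n.toNat % 10 ^ half            -- low  = n % 10 ** half
    let high := n.toNat / 10 ^ (d - half)     -- high = n // 10 ** (d - half), half ≤ d
    pyDigitSum 0 high == pyDigitSum 0 low     -- digit_sum(high) == digit_sum(low)

-- ===== PRECONDITION & SPEC =====
def Spec_is_number_balanced (n : Int) (out : Bool) : Prop := out = is_number_balanced_alt n
instance (n : Int) (out : Bool) : Decidable (Spec_is_number_balanced n out) := by unfold Spec_is_number_balanced; infer_instance

-- ===== CLAIM (what is proved, stated in full; the proofs are below) =====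
def Claim_equal_is_number_balanced : Prop := ∀ (n : Int), Dom_is_number_balanced n → Spec_is_number_balanced n (is_number_balanced n)

-- ===== LEMMAS AND PROOFS =====

-- int("c") value of a single character
def pvVal (c : Char) : Int := (PySem.Int.ofChars? [c]).getD 0

-- core's toDigits is the big-endian digit-character list
theorem toDigitsCore_eq (fuel : Nat) : ∀ (m : Nat) (acc : List Char), 0 < m → m < fuel →
    Nat.toDigitsCore 10 fuel m acc = ((Nat.digits 10 m).map Nat.digitChar).reverse ++ acc := by
  induction fuel with
  | zero => intro m acc h hf; omega
  | succ fuel ih =>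
    intro m acc hm hf
    rw [Nat.toDigitsCore.eq_def]
    simp only
    rw [Nat.digits_def' (by norm_num : (1:Nat) < 10) hm]
    by_cases h10 : m / 10 = 0
    · simp [h10]
    · rw [if_neg h10, ih (m / 10) _ (Nat.pos_of_ne_zero h10)
        (by have := Nat.div_lt_self hm (by norm_num : (1:Nat) < 10); omega)]
      simp

theorem toDigits_eq (m : Nat) (hm : 0 < m) :
    Nat.toDigits 10 m = ((Nat.digits 10 m).map Nat.digitChar).reverse := by
  have := toDigitsCore_eq (m + 1) m [] hm (Nat.lt_succ_self m)
  simpa [Nat.toDigits] using this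

theorem pvVal_digitChar (d : Nat) (hd : d < 10) : pvVal (Nat.digitChar d) = (d : Int) := by
  interval_cases d <;> decide

-- the two-ended loop of A computed as prefix sums of the value-mapped lists
theorem foldA_eq (cs : List Char) (k : Nat) (hk : k ≤ cs.length) :
    (PySem.List.pyRange 0 (k : Int) 1).foldl
      (fun (st : Int × Int) (i : Int) =>
        (st.1 + pvCharVal cs i, st.2 + pvCharVal cs ((cs.length : Int) - i - 1)))
      (0, 0)
    = (((cs.map pvVal).take k).sum, ((cs.reverse.map pvVal).take k).sum) := by
  induction k with
  | zero => simp
  | succ k ih =>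
    have hk' : k ≤ cs.length := Nat.le_of_succ_le hk
    have hklt : k < cs.length := hk
    have hkltr : k < cs.reverse.length := by simpa using hklt
    have hcast : ((k + 1 : Nat) : Int) = (k : Int) + 1 := by push_cast; ring
    rw [hcast, PySem.List.pyRange_one_succ_right (by positivity), List.foldl_append, ih hk']
    simp only [List.foldl_cons, List.foldl_nil]
    have hrl : cs.length - 1 - k < cs.length := by omega
    have h1 : pvCharVal cs (k : Int) = pvVal cs[k] := by
      simp [pvCharVal, pvVal, PySem.List.pyGet?_natCast, List.getElem?_eq_getElem hklt]
    have hL : (cs.length : Int) - (k : Int) - 1 = ((cs.length - 1 - k : Nat) : Int) := by omega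
    have h2 : pvCharVal cs ((cs.length : Int) - (k : Int) - 1) = pvVal (cs.reverse[k]'hkltr) := by
      rw [hL]
      simp [pvCharVal, pvVal, PySem.List.pyGet?_natCast, List.getElem?_eq_getElem hrl,
        List.getElem_reverse]
    rw [h1, h2, List.take_add_one, List.take_add_one, List.getElem?_map, List.getElem?_map,
      List.getElem?_eq_getElem hklt, List.getElem?_eq_getElem hkltr]
    simp

-- the counting loop computes log₁₀ + 1
theorem pvCountDigits_eq (n : Nat) : ∀ p d, 0 < p →
    pvCountDigits n p d = d + (if p ≤ n then Nat.log 10 (n / p) + 1 else 0) := by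
  intro p d hp
  induction p, d using pvCountDigits.induct n with
  | case1 p d h ih =>
    rw [pvCountDigits, dif_pos h, ih (by omega), if_pos h.2]
    by_cases h10 : 10 * p ≤ n
    · rw [if_pos h10]
      have hdd : n / (10 * p) = n / p / 10 := by
        rw [Nat.div_div_eq_div_mul, Nat.mul_comm]
      have h10le : 10 ≤ n / p := (Nat.le_div_iff_mul_le h.1).2 (by omega)
      have hpos : 0 < Nat.log 10 (n / p) := Nat.log_pos (by norm_num) h10le
      rw [hdd, Nat.log_div_base]
      omega
    · rw [if_neg h10]
      have hlt : n / p < 10 := (Nat.div_lt_iff_lt_mul h.1).2 (by omega)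
      rw [Nat.log_of_lt hlt]
  | case2 p d h =>
    rw [pvCountDigits, dif_neg h, if_neg (by omega)]
    omega

-- the digit_sum loop is the sum of the decimal digits
theorem pyDigitSum_eq : ∀ m s, pyDigitSum s m = s + (Nat.digits 10 m).sum := by
  intro m
  induction m using Nat.strong_induction_on with
  | _ m ih =>
    intro s
    rw [pyDigitSum]
    by_cases h : m = 0
    · simp [h]
    · rw [dif_neg h, Nat.digits_def' (by norm_num : (1:Nat) < 10) (Nat.pos_of_ne_zero h),
        ih (m / 10) (Nat.div_lt_self (Nat.pos_of_ne_zero h) (by norm_num))]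
      simp; omega

-- digit sum of the low part = sum of the low digits
theorem sum_digits_mod_pow (k : Nat) : ∀ m,
    (Nat.digits 10 (m % 10 ^ k)).sum = ((Nat.digits 10 m).take k).sum := by
  induction k with
  | zero => intro m; simp [Nat.mod_one]
  | succ k ih =>
    intro m
    by_cases hm : m = 0
    · simp [hm]
    · rw [Nat.digits_def' (by norm_num : (1:Nat) < 10) (Nat.pos_of_ne_zero hm)]
      have hmod : m % 10 ^ (k + 1) % 10 = m % 10 := by
        rw [Nat.mod_mod_of_dvd _ ⟨10 ^ k, by ring⟩]
      have hdiv : m % 10 ^ (k + 1) / 10 = m / 10 % 10 ^ k := by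
        rw [pow_succ, Nat.mul_comm, Nat.mod_mul_right_div_self]
      by_cases hr : m % 10 ^ (k + 1) = 0
      · have h1 : m % 10 = 0 := by rw [← hmod, hr]
        have h2 : m / 10 % 10 ^ k = 0 := by rw [← hdiv, hr]
        have := ih (m / 10)
        rw [h2] at this
        simp [hr, h1, ← this]
      · rw [Nat.digits_def' (by norm_num : (1:Nat) < 10) (Nat.pos_of_ne_zero hr),
          hmod, hdiv, List.take_succ_cons, List.sum_cons, List.sum_cons, ih (m / 10)]

-- digits of the high part = the high digits
theorem digits_div_pow (j : Nat) : ∀ m,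
    Nat.digits 10 (m / 10 ^ j) = (Nat.digits 10 m).drop j := by
  induction j with
  | zero => intro m; simp
  | succ j ih =>
    intro m
    by_cases hm : m = 0
    · simp [hm]
    · rw [Nat.digits_def' (by norm_num : (1:Nat) < 10) (Nat.pos_of_ne_zero hm),
        List.drop_succ_cons, ← ih (m / 10), pow_succ', ← Nat.div_div_eq_div_mul]

-- Bool equality of casts
theorem beq_cast_nat (a b : Nat) : ((a : Int) == (b : Int)) = (a == b) := by
  by_cases h : a = b
  · simp [h]
  · simp [h]

theorem main_eq (n : Int) : is_number_balanced n = is_number_balanced_alt n := by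
  by_cases hlt : n < 10
  · simp [is_number_balanced, is_number_balanced_alt, hlt]
  · rw [is_number_balanced, if_neg hlt, is_number_balanced_alt, if_neg hlt]
    have htpos : 0 < n.toNat := by omega
    have hn0 : ¬ n < 0 := by omega
    obtain ⟨D, hD⟩ : ∃ D, Nat.digits 10 n.toNat = D := ⟨_, rfl⟩
    have hDlt : ∀ d ∈ D, d < 10 := fun d hd => Nat.digits_lt_base (by norm_num) (hD ▸ hd)
    have hchars : PySem.Int.toChars n = (D.map Nat.digitChar).reverse := by
      rw [PySem.Int.toChars, if_neg hn0, toDigits_eq _ htpos, hD]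
    have hmapval : (D.map Nat.digitChar).map pvVal = D.map (fun (d : Nat) => (d : Int)) := by
      rw [List.map_map]
      exact List.map_congr_left (fun d hd => pvVal_digitChar d (hDlt d hd))
    have hlen : (PySem.Int.toChars n).length = D.length := by rw [hchars]; simp
    -- the counting loop yields the number of digits
    have hcount : pvCountDigits n.toNat 1 0 = D.length := by
      rw [pvCountDigits_eq n.toNat 1 0 (by norm_num), if_pos (by omega),
        ← hD, Nat.length_digits 10 n.toNat (by norm_num) (by omega)]
      simp
    -- A's side
    simp only [PySem.Str.len, PySem.Int.toList_toStr, hlen]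
    have hfd : PySem.Int.floordiv (D.length : Int) 2 = ((D.length / 2 : Nat) : Int) := by
      simp [PySem.Int.floordiv, Int.fdiv_eq_ediv]
    rw [hfd]
    have hfold := foldA_eq (PySem.Int.toChars n) (D.length / 2)
      (by rw [hlen]; exact Nat.div_le_self _ 2)
    rw [hlen] at hfold
    rw [hfold]
    have hrevrev : (PySem.Int.toChars n).reverse = D.map Nat.digitChar := by
      rw [hchars, List.reverse_reverse]
    have hS2 : (((PySem.Int.toChars n).reverse.map pvVal).take (D.length / 2)).sum
        = ((D.take (D.length / 2)).map (fun (d : Nat) => (d : Int))).sum := by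
      rw [hrevrev, hmapval, List.map_take]
    have hS1 : (((PySem.Int.toChars n).map pvVal).take (D.length / 2)).sum
        = ((D.drop (D.length - D.length / 2)).map (fun (d : Nat) => (d : Int))).sum := by
      rw [hchars, List.map_reverse, hmapval, List.take_reverse, List.sum_reverse,
        List.length_map, List.map_drop]
    rw [hS1, hS2]
    -- B's side
    rw [hcount, pyDigitSum_eq, pyDigitSum_eq, sum_digits_mod_pow, digits_div_pow, hD]
    rw [← Nat.cast_list_sum, ← Nat.cast_list_sum, beq_cast_nat]
    simp only [Nat.zero_add]
    by_cases h : ((Nat.digits 10 n.toNat).drop (D.length - D.length / 2)).sum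
        = ((Nat.digits 10 n.toNat).take (D.length / 2)).sum
    · rw [hD] at h; simp [h]
    · rw [hD] at h; simp [h]

-- ===== VERDICT (by name: the statement is the Claim_ definition above) =====
theorem is_number_balanced_spec : Claim_equal_is_number_balanced := by
  intro n _
  unfold Spec_is_number_balanced
  exact main_eq n
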